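-- pv_equiv track=rewrite | github.com/Na-Hyeon-Oh/Python-PS-Team-Notes | 프로그래머스/완전탐색/모의고사.py | solution
-- ===== SOURCE A (Python) =====
-- def solution(answers):
--     answer = []
--     first = [1, 2, 3, 4, 5]
--     second = [2, 1, 2, 3, 2, 4, 2, 5]
--     third = [3, 3, 1, 1, 2, 2, 4, 4, 5, 5]
--
--     l1, l2, l3 = len(first), len(second), len(third)
--     cnt1, cnt2, cnt3 = 0, 0, 0
--     for i in range(len(answers)):
--         if answers[i] == first[i % l1]: cnt1 += 1
--         if answers[i] == second[i % l2]: cnt2 += 1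
--         if answers[i] == third[i % l3]: cnt3 += 1
--
--     maxScore = max(cnt1, cnt2, cnt3)
--     if maxScore == cnt1: answer.append(1)
--     if maxScore == cnt2: answer.append(2)
--     if maxScore == cnt3: answer.append(3)
--     answer.sort()                   # 오름차순
--     return answer
-- ===== SOURCE B (Python) =====
-- def solution(answers):
--     # Histogram algorithm: one pass builds a frequency table keyed by
--     # (position mod 40, answer) -- 40 = lcm of the three pattern lengths --
--     # then each pattern's score is read off the table in 40 lookups,
--     # without ever re-scanning the answers.
--     freq = {}
--     for i, a in enumerate(answers):
--         key = (i % 40, a)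
--         freq[key] = freq.get(key, 0) + 1
--     patterns = [[1, 2, 3, 4, 5],
--                 [2, 1, 2, 3, 2, 4, 2, 5],
--                 [3, 3, 1, 1, 2, 2, 4, 4, 5, 5]]
--     scores = [sum(freq.get((r, p[r % len(p)]), 0) for r in range(40)) for p in patterns]
--     best = max(scores)
--     return [k + 1 for k, s in enumerate(scores) if s == best]
-- ===== Notes on version B (the rewrite author's own statement) =====
-- stated objective: alternative
-- what changed: Replaces A's per-element comparison against all three patterns with a histogram algorithm: one pass builds a frequency dictionary keyed by (index mod 40, answer) (40 = lcm of the pattern lengths), and each pattern's score is then read off the table in 40 dictionary lookups without re-scanning the answers; the result comprehension is ascending so no sort is needed.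
import Mathlib
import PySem

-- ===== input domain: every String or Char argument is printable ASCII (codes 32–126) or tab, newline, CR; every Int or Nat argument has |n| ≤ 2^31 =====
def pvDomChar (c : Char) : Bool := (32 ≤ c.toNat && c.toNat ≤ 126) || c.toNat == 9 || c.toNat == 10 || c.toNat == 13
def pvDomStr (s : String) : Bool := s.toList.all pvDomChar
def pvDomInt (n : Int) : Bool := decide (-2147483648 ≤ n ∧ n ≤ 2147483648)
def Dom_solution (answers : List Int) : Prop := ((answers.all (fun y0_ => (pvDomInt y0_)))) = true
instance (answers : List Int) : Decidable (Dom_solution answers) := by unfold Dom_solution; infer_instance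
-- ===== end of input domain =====

-- B replaces A's per-element comparison against all three patterns with a histogram:
-- one pass builds a frequency dict keyed by (index mod 40, answer) (40 = lcm of the
-- pattern lengths), then each pattern's score is 40 table lookups, and the ascending
-- result comprehension needs no sort (objective: alternative, same cost).

-- ===== PORT A =====
def solution (answers : List Int) : List Int :=
  let first : List Int := [1, 2, 3, 4, 5]
  let second : List Int := [2, 1, 2, 3, 2, 4, 2, 5]
  let third : List Int := [3, 3, 1, 1, 2, 2, 4, 4, 5, 5]
  let l1 : Int := (first.length : Int)
  let l2 : Int := (second.length : Int)
  let l3 : Int := (third.length : Int)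
  let c : Int × Int × Int :=
    (PySem.List.pyRange 0 (answers.length : Int) 1).foldl
      (fun (c : Int × Int × Int) i =>
        let a := PySem.List.pyGetD answers i 0
        let c1 := if a = PySem.List.pyGetD first (PySem.Int.mod i l1) 0 then c.1 + 1 else c.1
        let c2 := if a = PySem.List.pyGetD second (PySem.Int.mod i l2) 0 then c.2.1 + 1 else c.2.1
        let c3 := if a = PySem.List.pyGetD third (PySem.Int.mod i l3) 0 then c.2.2 + 1 else c.2.2
        (c1, c2, c3))
      (0, 0, 0)
  let maxScore : Int := max c.1 (max c.2.1 c.2.2)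
  let answer : List Int :=
    ((if maxScore = c.1 then [(1 : Int)] else []) ++
     (if maxScore = c.2.1 then [(2 : Int)] else [])) ++
    (if maxScore = c.2.2 then [(3 : Int)] else [])
  PySem.List.sorted answer id

-- ===== PORT B =====
-- one pass: freq[(i % 40, a)] += 1
def pvFreq (answers : List Int) : PySem.Dict (Int × Int) Int :=
  (PySem.List.enumerate answers 0).foldl
    (fun d ia =>
      let key := (PySem.Int.mod ia.1 40, ia.2)
      d.insert key (d.getD key 0 + 1))
    PySem.Dict.empty

def solution_alt (answers : List Int) : List Int :=
  let freq := pvFreq answers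
  let patterns : List (List Int) :=
    [[1, 2, 3, 4, 5], [2, 1, 2, 3, 2, 4, 2, 5], [3, 3, 1, 1, 2, 2, 4, 4, 5, 5]]
  let scores : List Int :=
    patterns.map (fun p =>
      ((PySem.List.pyRange 0 40 1).map
        (fun r => freq.getD (r, PySem.List.pyGetD p (PySem.Int.mod r (p.length : Int)) 0) 0)).sum)
  let best : Int := PySem.List.maxD scores id 0
  (PySem.List.enumerate scores 0).filterMap
    (fun ks => if ks.2 = best then some (ks.1 + 1) else none)

-- ===== PRECONDITION & SPEC =====
def Spec_solution (answers : List Int) (out : List Int) : Prop := out = solution_alt answers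
instance (answers : List Int) (out : List Int) : Decidable (Spec_solution answers out) := by unfold Spec_solution; infer_instance

-- ===== CLAIM (what is proved, stated in full; the proofs are below) =====
def Claim_equal_solution : Prop := ∀ (answers : List Int), Dom_solution answers → Spec_solution answers (solution answers)

-- ===== LEMMAS AND PROOFS =====

-- number of matches of `ans` (whose first element sits at position s) against pattern `pat`
def pvCnt (pat : List Int) : List Int → Nat → Int
  | [], _ => 0
  | x :: xs, s =>
      (if x = PySem.List.pyGetD pat (PySem.Int.mod (s : Int) (pat.length : Int)) 0 then 1 else 0)
      + pvCnt pat xs (s + 1)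

-- the keyed list B's histogram counts
def pvKeys (ans : List Int) (s : Nat) : List (Int × Int) :=
  (PySem.List.enumerate ans (s : Int)).map (fun ia => (PySem.Int.mod ia.1 40, ia.2))

lemma pvKeys_cons (x : Int) (xs : List Int) (s : Nat) :
    pvKeys (x :: xs) s = (PySem.Int.mod (s : Int) 40, x) :: pvKeys xs (s + 1) := by
  simp only [pvKeys, PySem.List.enumerate_cons, List.map_cons]
  norm_cast

-- sum over L of the 0/1 indicator [(m, a) = (r, f r)]: zero when m ∉ L …
lemma sum_ind_zero (f : Int → Int) (m a : Int) (L : List Int) (hm : m ∉ L) :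
    (L.map (fun r => if ((m, a) : Int × Int) = (r, f r) then (1 : Int) else 0)).sum = 0 := by
  induction L with
  | nil => rfl
  | cons r L ih =>
    have hr : m ≠ r := fun h => hm (h ▸ List.mem_cons_self)
    have hne : ((m, a) : Int × Int) ≠ (r, f r) := fun h => hr (congrArg Prod.fst h)
    simp only [List.map_cons, List.sum_cons]
    rw [if_neg hne, ih (fun h => hm (List.mem_cons_of_mem _ h))]
    simp

-- … and exactly the single term at r = m when m ∈ L and L has no duplicates
lemma sum_ind_one (f : Int → Int) (m a : Int) (L : List Int) (hm : m ∈ L) (hnd : L.Nodup) :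
    (L.map (fun r => if ((m, a) : Int × Int) = (r, f r) then (1 : Int) else 0)).sum
      = if a = f m then 1 else 0 := by
  induction L with
  | nil => cases hm
  | cons r L ih =>
    simp only [List.map_cons, List.sum_cons]
    rcases List.mem_cons.mp hm with h | h
    · subst h
      rw [sum_ind_zero f m a L (List.nodup_cons.mp hnd).1, add_zero]
      by_cases ha : a = f m
      · rw [if_pos (by rw [ha]), if_pos ha]
      · rw [if_neg (fun h2 => ha (congrArg Prod.snd h2)), if_neg ha]
    · have hr : m ≠ r := fun he => (List.nodup_cons.mp hnd).1 (he ▸ h)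
      have hne : ((m, a) : Int × Int) ≠ (r, f r) := fun h2 => hr (congrArg Prod.fst h2)
      rw [if_neg hne, ih h (List.nodup_cons.mp hnd).2, zero_add]

-- B's 40-lookup score of a pattern equals the direct match count, for any pattern
-- whose length divides the histogram period 40
lemma score_eq (p : List Int) (hdvd : p.length ∣ 40) :
    ∀ (ans : List Int) (s : Nat),
    ((PySem.List.pyRange 0 40 1).map
      (fun r => ((pvKeys ans s).count (r, PySem.List.pyGetD p (PySem.Int.mod r (p.length : Int)) 0) : Int))).sum
    = pvCnt p ans s := by
  intro ans
  induction ans with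
  | nil =>
    intro s
    simp [pvKeys, PySem.List.enumerate_nil, pvCnt]
  | cons x xs ih =>
    intro s
    simp only [pvKeys_cons, List.count_cons, Nat.cast_add, Nat.cast_ite, Nat.cast_one,
      Nat.cast_zero, beq_iff_eq]
    rw [PySem.List.sum_map_add_int, ih (s + 1)]
    have hmem : PySem.Int.mod (s : Int) 40 ∈ PySem.List.pyRange 0 40 1 := by
      rw [PySem.List.mem_pyRange_one]
      exact ⟨PySem.Int.mod_nonneg _ (by omega), PySem.Int.mod_lt _ (by omega)⟩
    rw [sum_ind_one _ _ _ _ hmem (PySem.List.nodup_pyRange_one 0 40)]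
    have hm40 : PySem.Int.mod (s : Int) 40 = ((s % 40 : Nat) : Int) := by
      exact_mod_cast PySem.Int.mod_natCast s 40
    have hidx : PySem.Int.mod (PySem.Int.mod (s : Int) 40) (p.length : Int)
        = PySem.Int.mod (s : Int) (p.length : Int) := by
      rw [hm40]
      calc PySem.Int.mod ((s % 40 : Nat) : Int) ((p.length : Nat) : Int)
          = (((s % 40) % p.length : Nat) : Int) := PySem.Int.mod_natCast _ _
        _ = ((s % p.length : Nat) : Int) := by rw [Nat.mod_mod_of_dvd s hdvd]
        _ = PySem.Int.mod (s : Int) (p.length : Int) := (PySem.Int.mod_natCast _ _).symm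
    rw [hidx]
    simp only [pvCnt]
    ring

-- A's counter loop computes the same three match counts
lemma loop_eq (ans : List Int) : ∀ (xs : List Int) (s : Nat), ans.drop s = xs →
    ∀ (c1 c2 c3 : Int),
    (PySem.List.pyRange (s : Int) (ans.length : Int) 1).foldl
      (fun (c : Int × Int × Int) i =>
        let a := PySem.List.pyGetD ans i 0
        let d1 := if a = PySem.List.pyGetD [1, 2, 3, 4, 5] (PySem.Int.mod i (([1, 2, 3, 4, 5] : List Int).length : Int)) 0 then c.1 + 1 else c.1
        let d2 := if a = PySem.List.pyGetD [2, 1, 2, 3, 2, 4, 2, 5] (PySem.Int.mod i (([2, 1, 2, 3, 2, 4, 2, 5] : List Int).length : Int)) 0 then c.2.1 + 1 else c.2.1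
        let d3 := if a = PySem.List.pyGetD [3, 3, 1, 1, 2, 2, 4, 4, 5, 5] (PySem.Int.mod i (([3, 3, 1, 1, 2, 2, 4, 4, 5, 5] : List Int).length : Int)) 0 then c.2.2 + 1 else c.2.2
        (d1, d2, d3)) (c1, c2, c3)
    = (c1 + pvCnt [1, 2, 3, 4, 5] xs s,
       c2 + pvCnt [2, 1, 2, 3, 2, 4, 2, 5] xs s,
       c3 + pvCnt [3, 3, 1, 1, 2, 2, 4, 4, 5, 5] xs s) := by
  intro xs
  induction xs with
  | nil =>
    intro s h c1 c2 c3
    have hlen : ans.length ≤ s := by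
      by_contra hc
      have := List.drop_eq_nil_iff.mp h
      omega
    rw [PySem.List.pyRange_one_eq_nil (by exact_mod_cast hlen)]
    simp [pvCnt]
  | cons x xs ih =>
    intro s h c1 c2 c3
    have hs : s < ans.length := by
      by_contra hc
      rw [List.drop_eq_nil_of_le (by omega)] at h
      simp at h
    have hx : ans.getD s 0 = x := by
      have h0 : (ans.drop s)[0]? = some x := by rw [h]; rfl
      rw [List.getD_eq_getElem?_getD]
      simp only [List.getElem?_drop, Nat.add_zero] at h0
      simp [h0]
    have hget : PySem.List.pyGetD ans (s : Int) 0 = x := by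
      rw [PySem.List.pyGetD_natCast]; exact hx
    have hdrop : ans.drop (s + 1) = xs := by
      have h2 : List.drop 1 (List.drop s ans) = List.drop (s + 1) ans := List.drop_drop
      rw [h] at h2
      simpa using h2.symm
    have hcast : ((s : Int) + 1) = ((s + 1 : Nat) : Int) := by push_cast; ring
    rw [PySem.List.pyRange_one_cons (by exact_mod_cast hs), List.foldl_cons]
    simp only [hget, hcast]
    rw [ih (s + 1) hdrop]
    simp only [pvCnt]
    split_ifs <;> (try simp only [Prod.mk.injEq]) <;> omega

lemma maxD_three (c1 c2 c3 : Int) :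
    PySem.List.maxD [c1, c2, c3] id 0 = max c1 (max c2 c3) := by
  simp [PySem.List.maxD, PySem.List.max?]
  split_ifs <;> simp <;> split_ifs <;> simp <;> omega

lemma sel_eq (c1 c2 c3 : Int) :
    PySem.List.sorted
      (((if max c1 (max c2 c3) = c1 then [(1 : Int)] else []) ++
        (if max c1 (max c2 c3) = c2 then [(2 : Int)] else [])) ++
       (if max c1 (max c2 c3) = c3 then [(3 : Int)] else [])) id
    = (PySem.List.enumerate [c1, c2, c3] 0).filterMap
        (fun ks => if ks.2 = PySem.List.maxD [c1, c2, c3] id 0 then some (ks.1 + 1) else none) := by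
  rw [show (PySem.List.enumerate [c1, c2, c3] 0) = [(0, c1), (1, c2), (2, c3)] from rfl]
  simp only [maxD_three, List.filterMap]
  have f1 : (c1 = max c1 (max c2 c3)) ↔ (max c1 (max c2 c3) = c1) := eq_comm
  have f2 : (c2 = max c1 (max c2 c3)) ↔ (max c1 (max c2 c3) = c2) := eq_comm
  have f3 : (c3 = max c1 (max c2 c3)) ↔ (max c1 (max c2 c3) = c3) := eq_comm
  simp only [f1, f2, f3]
  split_ifs <;> decide

-- B's freq lookups are counts over the keyed list
lemma freq_getD (answers : List Int) (k : Int × Int) :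
    (pvFreq answers).getD k 0 = ((pvKeys answers 0).count k : Int) := by
  unfold pvFreq
  have h := PySem.Dict.getD_foldl_insert_add_one
    ((PySem.List.enumerate answers 0).map (fun ia => (PySem.Int.mod ia.1 40, ia.2)))
    PySem.Dict.empty k
  rw [List.foldl_map] at h
  simpa [PySem.Dict.getD_empty, pvKeys] using h

-- ===== VERDICT (by name: the statement is the Claim_ definition above) =====
theorem solution_spec : Claim_equal_solution := by
  intro answers _
  unfold Spec_solution solution solution_alt
  have hl := loop_eq answers answers 0 rfl 0 0 0
  rw [show (((0 : Nat) : Int)) = (0 : Int) from rfl] at hl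
  simp only [zero_add] at hl
  simp only [List.map, freq_getD]
  rw [score_eq [1, 2, 3, 4, 5] (by decide) answers 0,
      score_eq [2, 1, 2, 3, 2, 4, 2, 5] (by decide) answers 0,
      score_eq [3, 3, 1, 1, 2, 2, 4, 4, 5, 5] (by decide) answers 0]
  rw [hl]
  exact sel_eq _ _ _
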